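-- pv_equiv track=rewrite | github.com/NobuyukiInoue/LeetCode | Problems/2600_2699/2644_Find_the_Maximum_Divisibility_Score/Project_Python3/Find_the_Maximum_Divisibility_Score.py | maxDivScore_3
-- ===== SOURCE A (Python) =====
-- from typing import List, Dict, Tuple
--
-- def maxDivScore_3(nums: List[int], divisors: List[int]) -> int:
--     # 6400ms - 6402ms
--     max_cnt, ans = -1, -1
--     for _, divisor in enumerate(divisors):
--         cnt = 0
--         for _, num in enumerate(nums):
--             if num % divisor == 0:
--                 cnt += 1
--         if cnt > max_cnt:
--             max_cnt = cnt
--             ans = divisor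
--         elif cnt == max_cnt:
--             ans = min(ans, divisor)
--     return ans
-- ===== SOURCE B (Python) =====
-- def maxDivScore_3(nums, divisors):
--     # Transposed traversal over deduplicated sorted divisors: fold nums once,
--     # updating a whole vector of counts; then a first-strict-max scan over the
--     # ascending divisors yields the minimum divisor on ties automatically.
--     uniq = sorted(set(divisors))
--     counts = [0] * len(uniq)
--     for num in nums:
--         counts = [c + (num % d == 0) for c, d in zip(counts, uniq)]
--     best, ans = -1, -1
--     for d, c in zip(uniq, counts):
--         if c > best:
--             best, ans = c, d
--     return ans
-- ===== Notes on version B (the rewrite author's own statement) =====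
-- stated objective: alternative
-- what changed: Transposes the nested loops (outer over nums, updating a vector of counts for deduplicated divisors at once) and replaces the running-min tie-break by sorting the distinct divisors ascending so a strict-greater scan picks the minimal divisor automatically.
import Mathlib
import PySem

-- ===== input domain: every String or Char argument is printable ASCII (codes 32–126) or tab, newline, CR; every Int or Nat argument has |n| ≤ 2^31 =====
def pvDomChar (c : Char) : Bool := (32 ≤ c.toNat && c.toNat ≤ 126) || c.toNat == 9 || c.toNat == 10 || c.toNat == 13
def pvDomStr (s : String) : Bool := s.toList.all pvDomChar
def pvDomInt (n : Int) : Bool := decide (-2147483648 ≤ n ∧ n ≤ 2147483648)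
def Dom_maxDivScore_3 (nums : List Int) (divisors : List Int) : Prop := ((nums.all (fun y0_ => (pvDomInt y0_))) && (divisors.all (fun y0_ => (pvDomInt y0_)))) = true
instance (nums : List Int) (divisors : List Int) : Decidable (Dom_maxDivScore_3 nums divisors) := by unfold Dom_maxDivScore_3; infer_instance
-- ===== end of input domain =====

-- B transposes the nested loops (one pass over nums updating a vector of counts for the
-- deduplicated, ascending-sorted divisors) and picks the answer by a first-strict-max scan,
-- making the sorted order supply the minimum-on-ties rule: alternative decomposition.

-- ===== PORT A =====
-- A: outer loop over divisors keeping (max_cnt, ans); inner loop counts nums divisible.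
def maxDivScore_3 (nums : List Int) (divisors : List Int) : Int :=
  (divisors.foldl (fun (st : Int × Int) divisor =>
      let cnt : Int := nums.foldl (fun cnt num =>
        if PySem.Int.mod num divisor = 0 then cnt + 1 else cnt) 0
      if cnt > st.1 then (cnt, divisor)
      else if cnt = st.1 then (st.1, min st.2 divisor)
      else st) (-1, -1)).2

-- ===== PORT B =====
-- Source B: uniq = sorted(set(divisors)); fold nums updating the whole counts vector;
-- then scan zip(uniq, counts) taking the first strict maximum.
def maxDivScore_3_alt (nums : List Int) (divisors : List Int) : Int :=
  let uniq := PySem.List.sorted (PySem.Set.ofList divisors) (fun x => x)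
  let counts := nums.foldl (fun counts num =>
      (counts.zip uniq).map (fun p => p.1 + (if PySem.Int.mod num p.2 = 0 then (1 : Int) else 0)))
    (List.replicate uniq.length 0)
  ((uniq.zip counts).foldl (fun (st : Int × Int) p =>
      if p.2 > st.1 then (p.2, p.1) else st) (-1, -1)).2

-- ===== PRECONDITION & SPEC =====
-- Pre_ excludes exactly the inputs where Python A raises ZeroDivisionError:
-- a divisor 0 with nums nonempty (with nums = [] the inner loop never runs, so A returns).
def Pre_maxDivScore_3 (nums : List Int) (divisors : List Int) : Prop :=
  nums = [] ∨ (0 : Int) ∉ divisors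
instance (nums : List Int) (divisors : List Int) : Decidable (Pre_maxDivScore_3 nums divisors) := by unfold Pre_maxDivScore_3; infer_instance

def pvWitness_maxDivScore_3 : List Int × List Int := ([4, 7, 9, 3, 9], [5, 2, 3])

def Spec_maxDivScore_3 (nums : List Int) (divisors : List Int) (out : Int) : Prop := out = maxDivScore_3_alt nums divisors
instance (nums : List Int) (divisors : List Int) (out : Int) : Decidable (Spec_maxDivScore_3 nums divisors out) := by unfold Spec_maxDivScore_3; infer_instance

-- ===== CLAIM (what is proved, stated in full; the proofs are below) =====
def Claim_equal_maxDivScore_3 : Prop := ∀ (nums : List Int) (divisors : List Int), Dom_maxDivScore_3 nums divisors → Pre_maxDivScore_3 nums divisors → Spec_maxDivScore_3 nums divisors (maxDivScore_3 nums divisors)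

-- ===== LEMMAS AND PROOFS =====

-- the divisibility count both programs compute for one divisor
def pvCnt (nums : List Int) (d : Int) : Int :=
  nums.foldl (fun cnt num => if PySem.Int.mod num d = 0 then cnt + 1 else cnt) 0

lemma pvCnt_eq_countP (nums : List Int) (d : Int) :
    pvCnt nums d = (nums.countP (fun n => decide (PySem.Int.mod n d = 0)) : Int) := by
  unfold pvCnt
  have h := PySem.List.foldl_count_if (fun num => decide (PySem.Int.mod num d = 0)) nums 0
  simp only [decide_eq_true_eq] at h
  rw [h, zero_add]

lemma pvCnt_nonneg (nums : List Int) (d : Int) : 0 ≤ pvCnt nums d := by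
  rw [pvCnt_eq_countP]; positivity

lemma pvCnt_cons (num : Int) (rest : List Int) (d : Int) :
    pvCnt (num :: rest) d = (if PySem.Int.mod num d = 0 then 1 else 0) + pvCnt rest d := by
  rw [pvCnt_eq_countP, pvCnt_eq_countP, List.countP_cons]
  by_cases h : PySem.Int.mod num d = 0 <;> simp [h, Int.add_comm]

-- running maximum of the counts, seeded with -1
def pvMx (nums : List Int) (ds : List Int) : Int :=
  (ds.map (pvCnt nums)).foldl max (-1)

-- divisors attaining the maximal count
def pvF (nums : List Int) (ds : List Int) : List Int :=
  ds.filter (fun d => pvCnt nums d = pvMx nums ds)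

lemma pvMx_append (nums : List Int) (ds : List Int) (d : Int) :
    pvMx nums (ds ++ [d]) = max (pvMx nums ds) (pvCnt nums d) := by
  simp [pvMx, List.foldl_append]

lemma le_pvMx (nums : List Int) (ds : List Int) : ∀ x ∈ ds, pvCnt nums x ≤ pvMx nums ds := by
  intro x hx
  have := (PySem.List.le_foldl_max (ds.map (pvCnt nums)) (-1)).2 (pvCnt nums x)
    (List.mem_map_of_mem hx)
  simpa [pvMx] using this

lemma neg_one_le_pvMx (nums : List Int) (ds : List Int) : (-1 : Int) ≤ pvMx nums ds :=
  (PySem.List.le_foldl_max (ds.map (pvCnt nums)) (-1)).1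

-- pvMx depends on ds only through its set of elements
lemma pvMx_le_iff (nums : List Int) (ds : List Int) (m : Int) :
    pvMx nums ds ≤ m ↔ (-1 ≤ m ∧ ∀ x ∈ ds, pvCnt nums x ≤ m) := by
  constructor
  · intro h
    exact ⟨le_trans (neg_one_le_pvMx nums ds) h,
      fun x hx => le_trans (le_pvMx nums ds x hx) h⟩
  · rintro ⟨h1, h2⟩
    unfold pvMx
    induction ds using List.reverseRecOn with
    | nil => simpa using h1
    | append_singleton t d ih =>
      rw [List.map_append, List.foldl_append]
      simp only [List.map_cons, List.map_nil, List.foldl_cons, List.foldl_nil]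
      have ht := ih (fun x hx => h2 x (List.mem_append_left _ hx))
      have hd := h2 d (List.mem_append_right _ (List.mem_singleton_self d))
      exact max_le ht hd

lemma pvMx_eq_of_mem_iff (nums : List Int) (ds₁ ds₂ : List Int)
    (h : ∀ x, x ∈ ds₁ ↔ x ∈ ds₂) : pvMx nums ds₁ = pvMx nums ds₂ := by
  apply le_antisymm
  · exact (pvMx_le_iff nums ds₁ _).2 ⟨neg_one_le_pvMx nums ds₂,
      fun x hx => le_pvMx nums ds₂ x ((h x).1 hx)⟩
  · exact (pvMx_le_iff nums ds₂ _).2 ⟨neg_one_le_pvMx nums ds₁,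
      fun x hx => le_pvMx nums ds₁ x ((h x).2 hx)⟩

-- A's fold characterised: for nonempty ds it computes (pvMx, min of pvF), and pvF is nonempty
lemma foldA_spec (nums : List Int) (ds : List Int) (hne : ds ≠ []) :
    ∃ x t, pvF nums ds = x :: t ∧
      ds.foldl (fun (st : Int × Int) divisor =>
        let cnt : Int := nums.foldl (fun cnt num =>
          if PySem.Int.mod num divisor = 0 then cnt + 1 else cnt) 0
        if cnt > st.1 then (cnt, divisor)
        else if cnt = st.1 then (st.1, min st.2 divisor)
        else st) (-1, -1) = (pvMx nums ds, t.foldl min x) := by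
  induction ds using List.reverseRecOn with
  | nil => exact absurd rfl hne
  | append_singleton ds d ih =>
    rw [List.foldl_append]
    rcases eq_or_ne ds [] with h0 | h0
    · subst h0
      have hpos : pvCnt nums d > (-1 : Int) := by linarith [pvCnt_nonneg nums d]
      refine ⟨d, [], ?_, ?_⟩
      · unfold pvCnt at hpos
        simp [pvF, pvMx, pvCnt, max_eq_right (le_of_lt hpos)]
      · unfold pvCnt at hpos
        simp only [List.foldl_nil, List.foldl_cons]
        simp [hpos, pvMx, pvCnt, max_eq_right (le_of_lt hpos)]
    · obtain ⟨x, t, hF, hfold⟩ := ih h0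
      rw [hfold]
      simp only [List.foldl_cons, List.foldl_nil, show ∀ dv, nums.foldl (fun cnt num =>
        if PySem.Int.mod num dv = 0 then cnt + 1 else cnt) 0 = pvCnt nums dv from fun _ => rfl]
      rcases lt_trichotomy (pvMx nums ds) (pvCnt nums d) with hlt | heq | hgt
      · refine ⟨d, [], ?_, ?_⟩
        · have : pvF nums (ds ++ [d]) =
              ds.filter (fun e => pvCnt nums e = pvMx nums (ds ++ [d])) ++ [d] := by
            simp [pvF, pvMx_append, List.filter_append, max_eq_right (le_of_lt hlt)]
          rw [this, List.filter_eq_nil_iff.mpr ?_, List.nil_append]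
          intro e he
          have := le_pvMx nums ds e he
          simp only [pvMx_append, max_eq_right (le_of_lt hlt), decide_eq_true_eq]
          omega
        · simp [hlt, pvMx_append, max_eq_right (le_of_lt hlt)]
      · refine ⟨x, t ++ [d], ?_, ?_⟩
        · have : pvMx nums (ds ++ [d]) = pvMx nums ds := by
            simp [pvMx_append, ← heq]
          simp only [pvF, this, List.filter_append]
          rw [show ds.filter (fun e => pvCnt nums e = pvMx nums ds) = x :: t from hF]
          simp [← heq]
        · simp [pvMx_append, ← heq, List.foldl_append]
      · refine ⟨x, t, ?_, ?_⟩
        · have hmx : pvMx nums (ds ++ [d]) = pvMx nums ds := by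
            simp [pvMx_append, max_eq_left (le_of_lt hgt)]
          simp only [pvF, hmx, List.filter_append]
          rw [show ds.filter (fun e => pvCnt nums e = pvMx nums ds) = x :: t from hF]
          have : pvCnt nums d ≠ pvMx nums ds := by omega
          simp [this]
        · have h1 : ¬ (pvCnt nums d > pvMx nums ds) := by omega
          have h2 : pvCnt nums d ≠ pvMx nums ds := by omega
          simp [h1, h2, pvMx_append, max_eq_left (le_of_lt hgt)]

-- ---- B side ----

-- one transposed update step: adding the indicator pointwise to a mapped vector
lemma zip_map_step (f g : Int → Int) (l : List Int) :
    ((l.map f).zip l).map (fun p => p.1 + g p.2) = l.map (fun d => f d + g d) := by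
  induction l with
  | nil => rfl
  | cons a t ih => simp [ih]

-- the fold over nums turns the zero vector into the vector of counts
lemma fold_counts (nums : List Int) (l : List Int) (f : Int → Int) :
    nums.foldl (fun counts num =>
        (counts.zip l).map (fun p => p.1 + (if PySem.Int.mod num p.2 = 0 then (1 : Int) else 0)))
      (l.map f)
    = l.map (fun d => f d + pvCnt nums d) := by
  induction nums generalizing f with
  | nil => simp [pvCnt]
  | cons num rest ih =>
    rw [List.foldl_cons, zip_map_step f (fun d => if PySem.Int.mod num d = 0 then 1 else 0) l,
      ih (fun d => f d + if PySem.Int.mod num d = 0 then 1 else 0)]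
    apply List.map_congr_left
    intro d _
    rw [pvCnt_cons]
    ring

-- B's selection scan: over any list it returns (max count, FIRST divisor attaining it)
lemma scanB_spec (nums : List Int) (l : List Int) (hne : l ≠ []) :
    ∃ x t, l.filter (fun d => pvCnt nums d = pvMx nums l) = x :: t ∧
      (l.zip (l.map (pvCnt nums))).foldl (fun (st : Int × Int) p =>
        if p.2 > st.1 then (p.2, p.1) else st) (-1, -1) = (pvMx nums l, x) := by
  induction l using List.reverseRecOn with
  | nil => exact absurd rfl hne
  | append_singleton l d ih =>
    have hzip : (l ++ [d]).zip ((l ++ [d]).map (pvCnt nums))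
        = l.zip (l.map (pvCnt nums)) ++ [(d, pvCnt nums d)] := by
      rw [List.map_append, List.zip_append (by simp)]
      rfl
    rw [hzip, List.foldl_append]
    rcases eq_or_ne l [] with h0 | h0
    · subst h0
      have hpos : pvCnt nums d > (-1 : Int) := by linarith [pvCnt_nonneg nums d]
      refine ⟨d, [], ?_, ?_⟩
      · simp [pvMx, max_eq_right (le_of_lt hpos)]
      · simp [hpos, pvMx, max_eq_right (le_of_lt hpos)]
    · obtain ⟨x, t, hF, hfold⟩ := ih h0
      rw [hfold]
      simp only [List.foldl_cons, List.foldl_nil]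
      rcases le_or_gt (pvCnt nums d) (pvMx nums l) with hle | hlt
      · have hmx : pvMx nums (l ++ [d]) = pvMx nums l := by
          simp [pvMx_append, max_eq_left hle]
        refine ⟨x, t ++ (if pvCnt nums d = pvMx nums l then [d] else []), ?_, ?_⟩
        · rw [hmx, List.filter_append, hF]
          by_cases h : pvCnt nums d = pvMx nums l <;> simp [h]
        · have : ¬ (pvCnt nums d > pvMx nums l) := not_lt.mpr hle
          simp [this, hmx]
      · have hmx : pvMx nums (l ++ [d]) = pvCnt nums d := by
          simp [pvMx_append, max_eq_right (le_of_lt hlt)]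
        refine ⟨d, [], ?_, ?_⟩
        · rw [hmx, List.filter_append]
          rw [List.filter_eq_nil_iff.mpr ?_, List.nil_append]
          · simp
          · intro e he
            have := le_pvMx nums l e he
            simp only [decide_eq_true_eq]
            omega
        · simp [hlt, hmx]

-- a foldl min over x :: t is a least element of x :: t
lemma foldl_min_least (x : Int) (t : List Int) :
    t.foldl min x ∈ x :: t ∧ ∀ y ∈ x :: t, t.foldl min x ≤ y := by
  constructor
  · rcases PySem.List.foldl_min_mem t x with h | h
    · rw [h]; exact List.mem_cons_self
    · exact List.mem_cons_of_mem _ h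
  · intro y hy
    rcases List.mem_cons.mp hy with rfl | hy
    · exact (PySem.List.foldl_min_le t y).1
    · exact (PySem.List.foldl_min_le t x).2 y hy

-- ===== VERDICT (by name: the statement is the Claim_ definition above) =====
theorem maxDivScore_3_spec : Claim_equal_maxDivScore_3 := by
  intro nums divisors _ _
  unfold Spec_maxDivScore_3 maxDivScore_3 maxDivScore_3_alt
  dsimp only
  set uniq := PySem.List.sorted (PySem.Set.ofList divisors) (fun x => x) with huniq
  have hmemU : ∀ x, x ∈ uniq ↔ x ∈ divisors := by
    intro x
    rw [huniq, PySem.List.mem_sorted, PySem.Set.mem_ofList]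
  rcases eq_or_ne divisors [] with h | h
  · have hun : uniq = [] := by
      subst h
      cases hu : uniq with
      | nil => rfl
      | cons a t =>
        exact absurd ((hmemU a).1 (by rw [hu]; exact List.mem_cons_self)) List.not_mem_nil
    subst h
    simp [hun]
  · have hneU : uniq ≠ [] := by
      obtain ⟨d, ds', rfl⟩ := List.exists_cons_of_ne_nil h
      intro hc
      exact absurd ((hmemU d).2 List.mem_cons_self) (by simp [hc])
    -- reduce B's counts fold to the vector of counts
    have hcounts : nums.foldl (fun counts num =>
          (counts.zip uniq).map (fun p => p.1 + (if PySem.Int.mod num p.2 = 0 then (1 : Int) else 0)))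
        (List.replicate uniq.length 0) = uniq.map (pvCnt nums) := by
      have hrep : List.replicate uniq.length (0 : Int) = uniq.map (fun _ => 0) := by
        simp [List.map_const']
      rw [hrep, fold_counts nums uniq (fun _ => 0)]
      simp
    rw [hcounts]
    -- characterise both sides
    obtain ⟨x, t, hF, hfold⟩ := foldA_spec nums divisors h
    obtain ⟨x', t', hF', hscan⟩ := scanB_spec nums uniq hneU
    rw [hfold, hscan]
    -- the two maxima agree
    have hmxEq : pvMx nums uniq = pvMx nums divisors := pvMx_eq_of_mem_iff nums _ _ hmemU
    -- the two candidate lists have the same elements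
    have hsetEq : ∀ y, y ∈ x :: t ↔ y ∈ x' :: t' := by
      intro y
      rw [← hF, ← hF', pvF, List.mem_filter, List.mem_filter, hmxEq, hmemU y]
    -- x' is least in x' :: t' because uniq is strictly increasing
    have hpw : (x' :: t').Pairwise (· < ·) := by
      rw [← hF']
      exact List.Pairwise.filter _ (huniq ▸ PySem.List.sorted_ofList_pairwise_lt divisors)
    have hx'le : ∀ y ∈ x' :: t', x' ≤ y := by
      intro y hy
      rcases List.mem_cons.mp hy with rfl | hy
      · exact le_refl y
      · exact le_of_lt ((List.pairwise_cons.mp hpw).1 y hy)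
    -- A's min over x :: t equals x'
    obtain ⟨hmem, hleast⟩ := foldl_min_least x t
    have h1 : t.foldl min x ≤ x' := hleast x' ((hsetEq x').2 List.mem_cons_self)
    have h2 : x' ≤ t.foldl min x := hx'le _ ((hsetEq _).1 hmem)
    simp [le_antisymm h1 h2]
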